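-- pv_equiv track=rewrite | github.com/MoonSangJin/CodingTest | Programmers/모의고사.py | solution
-- ===== SOURCE A (Python) =====
-- def solution(answers):
--     count1 = count2 = count3 = 0  # 0으로 초기화
--     a = [1, 2, 3, 4, 5]  # 각 학생들의 찍는 패턴
--     b = [2, 1, 2, 3, 2, 4, 2, 5]
--     c = [3, 3, 1, 1, 2, 2, 4, 4, 5, 5]
--     result = []
--
--     for i in range(len(answers)):  # 인덱스 0부터 인덱스 len(answers)-1까지 반복
--         if(answers[i] == a[i % len(a)]):
--             count1 += 1
--         if(answers[i] == b[i % len(b)]):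
--             count2 += 1
--         if(answers[i] == c[i % len(c)]):
--             count3 += 1  # 여기까지하면 count1,count2,count3에 각각의 정답 갯수가 담긴다 이걸 어떻게 비교할까
--     answer_temp = [count1, count2, count3]
--     # enumberate함수를 사용하면 인덱스랑 인덱스의 값을 튜플() 로 반환한다.
--     for index, value in enumerate(answer_temp):
--         if(value == max(answer_temp)):  # 그런데 for문 돌면서 value가 각 인덱스의 값이 될텐데 max값과 같은거면 그 인덱스가 가장 많이 맞힌사람
--             # 그냥 index+1(시작이 0이니까)을 return 하지 않고 append를 쓴이유는 같은 개수를 맞힌 사람이 여러명이 있을 수도 있다.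
--             result.append(index+1)
--     return result  # 그걸 오름차순으로 return하라고 했는데 sort를 써야되나 했는데 어차피 인덱스를 return하는 것이고, for문은 어차피 인덱스 0부터 시작이니까
-- ===== SOURCE B (Python) =====
-- def solution(answers):
--     patterns = [[1, 2, 3, 4, 5],
--                 [2, 1, 2, 3, 2, 4, 2, 5],
--                 [3, 3, 1, 1, 2, 2, 4, 4, 5, 5]]
--     # One histogram pass: count answers by (position mod 40, value); 40 = lcm of the
--     # pattern lengths, so each pattern's score is a fixed 40-term lookup sum.
--     hist = {}
--     for i, a in enumerate(answers):
--         k = (i % 40, a)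
--         hist[k] = hist.get(k, 0) + 1
--     scores = [sum(hist.get((r, p[r % len(p)]), 0) for r in range(40))
--               for p in patterns]
--     best = max(scores)
--     return [k + 1 for k, s in enumerate(scores) if s == best]
-- ===== Notes on version B (the rewrite author's own statement) =====
-- stated objective: alternative
-- what changed: A's interleaved pass with three inline counters becomes a residue histogram: one pass builds a dict counting answers by (index mod 40, value) (40 = lcm of the pattern lengths), each pattern's score is then a fixed 40-term lookup sum, followed by an argmax collection.
import Mathlib
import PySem

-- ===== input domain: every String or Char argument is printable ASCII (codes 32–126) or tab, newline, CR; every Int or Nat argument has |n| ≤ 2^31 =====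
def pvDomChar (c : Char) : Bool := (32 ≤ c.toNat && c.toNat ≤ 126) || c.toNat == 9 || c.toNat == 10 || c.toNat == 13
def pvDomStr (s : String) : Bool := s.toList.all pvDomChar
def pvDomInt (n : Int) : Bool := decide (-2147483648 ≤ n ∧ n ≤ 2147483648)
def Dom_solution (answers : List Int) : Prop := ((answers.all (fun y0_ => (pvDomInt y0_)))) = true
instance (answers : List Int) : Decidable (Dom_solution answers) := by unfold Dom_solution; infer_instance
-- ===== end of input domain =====

-- B replaces A's interleaved pass with three inline counters by a different algorithm:
-- one histogram pass keyed by (index mod 40, answer) — 40 = lcm of the pattern lengths —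
-- then each pattern's score is a fixed 40-term dictionary-lookup sum, then argmax.

-- ===== PORT A =====
def solution (answers : List Int) : List Int :=
  let a : List Int := [1, 2, 3, 4, 5]
  let b : List Int := [2, 1, 2, 3, 2, 4, 2, 5]
  let c : List Int := [3, 3, 1, 1, 2, 2, 4, 4, 5, 5]
  let cnt : Int × Int × Int :=
    (PySem.List.pyRange 0 answers.length 1).foldl
      (fun (t : Int × Int × Int) i =>
        (if PySem.List.pyGetD answers i 0 = PySem.List.pyGetD a (PySem.Int.mod i (a.length : Int)) 0 then t.1 + 1 else t.1,
         if PySem.List.pyGetD answers i 0 = PySem.List.pyGetD b (PySem.Int.mod i (b.length : Int)) 0 then t.2.1 + 1 else t.2.1,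
         if PySem.List.pyGetD answers i 0 = PySem.List.pyGetD c (PySem.Int.mod i (c.length : Int)) 0 then t.2.2 + 1 else t.2.2))
      (0, 0, 0)
  let answer_temp : List Int := [cnt.1, cnt.2.1, cnt.2.2]
  (PySem.List.enumerate answer_temp 0).foldl
    (fun result iv =>
      if iv.2 == (PySem.List.max? answer_temp (fun y => y)).getD 0 then result ++ [iv.1 + 1] else result)
    []

-- ===== PORT B =====
def solution_alt (answers : List Int) : List Int :=
  let patterns : List (List Int) :=
    [[1, 2, 3, 4, 5], [2, 1, 2, 3, 2, 4, 2, 5], [3, 3, 1, 1, 2, 2, 4, 4, 5, 5]]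
  -- hist[(i % 40, a)] = hist.get((i % 40, a), 0) + 1, one pass over enumerate(answers)
  let hist : PySem.Dict (Int × Int) Int :=
    (PySem.List.enumerate answers 0).foldl
      (fun d ia =>
        let k : Int × Int := (PySem.Int.mod ia.1 40, ia.2)
        d.insert k (d.getD k 0 + 1))
      PySem.Dict.empty
  -- sum(hist.get((r, p[r % len(p)]), 0) for r in range(40))
  let scores : List Int := patterns.map (fun p =>
    ((PySem.List.pyRange 0 40 1).map
      (fun r => hist.getD (r, PySem.List.pyGetD p (PySem.Int.mod r (p.length : Int)) 0) 0)).sum)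
  let best : Int := (PySem.List.max? scores (fun y => y)).getD 0
  ((PySem.List.enumerate scores 0).filter (fun is => is.2 == best)).map (fun is => is.1 + 1)

-- ===== PRECONDITION & SPEC =====
def Spec_solution (answers : List Int) (out : List Int) : Prop := out = solution_alt answers
instance (answers : List Int) (out : List Int) : Decidable (Spec_solution answers out) := by unfold Spec_solution; infer_instance

-- ===== CLAIM (what is proved, stated in full; the proofs are below) =====
def Claim_equal_solution : Prop := ∀ (answers : List Int), Dom_solution answers → Spec_solution answers (solution answers)

-- ===== LEMMAS AND PROOFS =====

-- A's per-pattern count, as an indicator sum over enumerate(answers)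
def pvScore (p : List Int) (answers : List Int) : Int :=
  ((PySem.List.enumerate answers 0).map
    (fun ia => if ia.2 = PySem.List.pyGetD p (PySem.Int.mod ia.1 (p.length : Int)) 0 then (1 : Int) else 0)).sum

-- Each component of A's triple accumulator is pvScore of the corresponding pattern.
theorem pv_counts_eq (p answers : List Int) :
    (PySem.List.pyRange 0 answers.length 1).foldl
      (fun (c : Int) i =>
        if PySem.List.pyGetD answers i 0 = PySem.List.pyGetD p (PySem.Int.mod i (p.length : Int)) 0 then c + 1 else c)
      0 = pvScore p answers := by
  unfold pvScore
  rw [PySem.List.enumerate_eq_map_pyRange (d := 0), List.map_map]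
  have h : (fun (c : Int) i =>
      if PySem.List.pyGetD answers i 0 = PySem.List.pyGetD p (PySem.Int.mod i (p.length : Int)) 0 then c + 1 else c)
      = fun (c : Int) i => c +
      (if PySem.List.pyGetD answers i 0 = PySem.List.pyGetD p (PySem.Int.mod i (p.length : Int)) 0 then (1:Int) else 0) := by
    funext c i; split <;> simp
  rw [h, PySem.List.foldl_add]
  simp only [Int.zero_add]
  rfl

theorem pv_triple (answers p1 p2 p3 : List Int) :
    (PySem.List.pyRange 0 answers.length 1).foldl
      (fun (t : Int × Int × Int) i =>
        (if PySem.List.pyGetD answers i 0 = PySem.List.pyGetD p1 (PySem.Int.mod i (p1.length : Int)) 0 then t.1 + 1 else t.1,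
         if PySem.List.pyGetD answers i 0 = PySem.List.pyGetD p2 (PySem.Int.mod i (p2.length : Int)) 0 then t.2.1 + 1 else t.2.1,
         if PySem.List.pyGetD answers i 0 = PySem.List.pyGetD p3 (PySem.Int.mod i (p3.length : Int)) 0 then t.2.2 + 1 else t.2.2))
      (0, 0, 0)
    = (pvScore p1 answers, pvScore p2 answers, pvScore p3 answers) := by
  rw [PySem.List.foldl_prod_mk
      (f := fun (c : Int) i =>
        if PySem.List.pyGetD answers i 0 = PySem.List.pyGetD p1 (PySem.Int.mod i (p1.length : Int)) 0 then c + 1 else c)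
      (g := fun (t : Int × Int) i =>
        (if PySem.List.pyGetD answers i 0 = PySem.List.pyGetD p2 (PySem.Int.mod i (p2.length : Int)) 0 then t.1 + 1 else t.1,
         if PySem.List.pyGetD answers i 0 = PySem.List.pyGetD p3 (PySem.Int.mod i (p3.length : Int)) 0 then t.2 + 1 else t.2))]
  rw [PySem.List.foldl_prod_mk
      (f := fun (c : Int) i =>
        if PySem.List.pyGetD answers i 0 = PySem.List.pyGetD p2 (PySem.Int.mod i (p2.length : Int)) 0 then c + 1 else c)
      (g := fun (c : Int) i =>
        if PySem.List.pyGetD answers i 0 = PySem.List.pyGetD p3 (PySem.Int.mod i (p3.length : Int)) 0 then c + 1 else c)]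
  rw [pv_counts_eq p1 answers, pv_counts_eq p2 answers, pv_counts_eq p3 answers]

-- A 0/1 indicator summed over a nodup range containing x.1 collapses to the x-term.
theorem pv_sum_ind (rs : List Int) (f : Int → Int) (x : Int × Int)
    (hnd : rs.Nodup) (hmem : x.1 ∈ rs) :
    (rs.map (fun r => if (r, f r) = x then (1:Int) else 0)).sum
      = if x.2 = f x.1 then 1 else 0 := by
  induction rs with
  | nil => simp at hmem
  | cons r t ih =>
    rcases List.nodup_cons.mp hnd with ⟨hr, hnt⟩
    simp only [List.map_cons, List.sum_cons]
    rcases List.mem_cons.mp hmem with h1 | h1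
    · have htz : (t.map (fun r => if (r, f r) = x then (1:Int) else 0)).sum = 0 := by
        apply List.sum_eq_zero
        intro y hy
        rcases List.mem_map.mp hy with ⟨r', hr', hy'⟩
        have hne : (r', f r') ≠ x := by
          intro he
          subst he
          exact hr (h1 ▸ hr')
        simp [hne] at hy'
        omega
      rw [htz]
      have : ((r, f r) = x) ↔ (x.2 = f x.1) := by
        constructor
        · intro he; rw [← he]
        · intro he
          have : x = (x.1, x.2) := rfl
          rw [this, ← h1, he, h1]
      by_cases hc : x.2 = f x.1 <;> simp [this, hc]
    · have hne : (r, f r) ≠ x := by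
        intro he
        have : x.1 = r := by rw [← he]
        exact hr (this ▸ h1)
      rw [ih hnt h1]
      simp [hne]

-- Summing histogram counts over all residues = summing the match indicator over the list.
theorem pv_sum_count (l : List (Int × Int)) (f : Int → Int)
    (h : ∀ x ∈ l, x.1 ∈ PySem.List.pyRange 0 40 1) :
    ((PySem.List.pyRange 0 40 1).map (fun r => ((l.count (r, f r) : Int)))).sum
      = (l.map (fun x => if x.2 = f x.1 then (1:Int) else 0)).sum := by
  induction l with
  | nil => simp
  | cons x t ih =>
    have hx := h x (List.mem_cons_self)
    have ht : ∀ y ∈ t, y.1 ∈ PySem.List.pyRange 0 40 1 := fun y hy => h y (List.mem_cons_of_mem _ hy)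
    simp only [List.count_cons, List.map_cons, List.sum_cons]
    have hsplit : ((PySem.List.pyRange 0 40 1).map
        (fun r => (((t.count (r, f r) + if x == (r, f r) then 1 else 0 : Nat)) : Int))).sum
      = ((PySem.List.pyRange 0 40 1).map (fun r => ((t.count (r, f r) : Int)))).sum
        + ((PySem.List.pyRange 0 40 1).map (fun r => if (r, f r) = x then (1:Int) else 0)).sum := by
      rw [← PySem.List.sum_map_add_int]
      apply congrArg List.sum
      apply List.map_congr_left
      intro r _
      by_cases hc : (r, f r) = x
      · simp [hc]
      · have hc' : ¬ (x = (r, f r)) := fun he => hc he.symm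
        simp [hc, hc']
    rw [hsplit, ih ht, pv_sum_ind _ f x (by decide) hx]
    ring

-- B's 40-term lookup sum for pattern p equals A's direct count, since len p divides 40.
theorem pv_score_eq (answers p : List Int) (hd : (p.length : Int) ∣ 40) :
    ((PySem.List.pyRange 0 40 1).map
      (fun r => (((PySem.List.enumerate answers 0).foldl
          (fun d ia =>
            let k : Int × Int := (PySem.Int.mod ia.1 40, ia.2)
            d.insert k (d.getD k 0 + 1))
          PySem.Dict.empty).getD (r, PySem.List.pyGetD p (PySem.Int.mod r (p.length : Int)) 0) 0))).sum
      = pvScore p answers := by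
  have hpos : (0:Int) < (p.length : Int) := by
    rcases Int.lt_or_lt_of_ne (fun h0 : (p.length:Int) = 0 => by simp [h0] at hd) with h | h
    · omega
    · exact h
  have hhist : (PySem.List.enumerate answers 0).foldl
      (fun d ia =>
        let k : Int × Int := (PySem.Int.mod ia.1 40, ia.2)
        d.insert k (d.getD k 0 + 1))
      PySem.Dict.empty
      = PySem.Dict.counter ((PySem.List.enumerate answers 0).map (fun ia => (PySem.Int.mod ia.1 40, ia.2))) := by
    rw [← PySem.Dict.foldl_insert_getD_add_one_eq_counter, List.foldl_map]
  rw [hhist]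
  simp only [PySem.Dict.getD_counter]
  rw [pv_sum_count _ (fun r => PySem.List.pyGetD p (PySem.Int.mod r (p.length : Int)) 0)
      (by
        intro x hx
        rcases List.mem_map.mp hx with ⟨ia, _, hia⟩
        rw [← hia]
        exact PySem.List.mem_pyRange_one.mpr
          ⟨PySem.Int.mod_nonneg _ (by norm_num), PySem.Int.mod_lt _ (by norm_num)⟩)]
  rw [List.map_map]
  unfold pvScore
  apply congrArg List.sum
  apply List.map_congr_left
  intro ia _
  simp only [Function.comp]
  have hmm : PySem.Int.mod (PySem.Int.mod ia.1 40) (p.length : Int) = PySem.Int.mod ia.1 (p.length : Int) := by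
    rw [PySem.Int.mod_eq_emod_of_pos (by norm_num : (0:Int) < 40),
        PySem.Int.mod_eq_emod_of_pos hpos, PySem.Int.mod_eq_emod_of_pos hpos,
        Int.emod_emod_of_dvd _ hd]
  rw [hmm]

theorem solution_eq (answers : List Int) : solution answers = solution_alt answers := by
  unfold solution solution_alt
  dsimp only
  rw [pv_triple answers [1,2,3,4,5] [2,1,2,3,2,4,2,5] [3,3,1,1,2,2,4,4,5,5]]
  simp only [List.map_cons, List.map_nil]
  rw [pv_score_eq answers [1,2,3,4,5] (by decide),
      pv_score_eq answers [2,1,2,3,2,4,2,5] (by decide),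
      pv_score_eq answers [3,3,1,1,2,2,4,4,5,5] (by decide)]
  rw [PySem.List.foldl_append_if]
  simp

-- ===== VERDICT (by name: the statement is the Claim_ definition above) =====
theorem solution_spec : Claim_equal_solution := by
  intro answers _
  unfold Spec_solution
  exact solution_eq answers
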